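-- pv_equiv track=rewrite | github.com/purrsec/askIT | src/askit/cli.py | parse_and_join_prompt
-- ===== SOURCE A (Python) =====
-- def parse_and_join_prompt(args: list[str]) -> tuple[list[str], str | None]:
--     """
--     Finds -p or --prompt, joins the subsequent words into a single string,
--     and returns the remaining arguments along with the extracted prompt.
--     """
--     try:
--         if "-p" in args:
--             p_index = args.index("-p")
--         elif "--prompt" in args:
--             p_index = args.index("--prompt")
--         else:
--             return args, None  # No prompt flag found
--     except ValueError:
--         # Should not happen if one of the flags is present, but good practice
--         return args, None
--
--     # Get arguments before the flag
--     remaining_args = args[:p_index]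
--
--     # Get words for the prompt
--     prompt_words = []
--     prompt_start_index = p_index + 1
--
--     # Iterate from the word after the flag to the end of the arguments
--     for i in range(prompt_start_index, len(args)):
--         arg = args[i]
--         # Stop if we hit another option
--         if arg.startswith('-'):
--             # This and subsequent args are not part of the prompt
--             remaining_args.extend(args[i:])
--             break
--         prompt_words.append(arg)
--
--     if not prompt_words:
--         # This happens if -p is at the end of the command
--         return remaining_args, None
--
--     prompt = " ".join(prompt_words)
--     return remaining_args, prompt
-- ===== SOURCE B (Python) =====
-- def parse_and_join_prompt(args: list[str]) -> tuple[list[str], str | None]: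
--     """Recursive decomposition: split the list at the flag, then recursively peel
--     prompt words off the tail; no indices at all."""
--     flag = "-p" if "-p" in args else ("--prompt" if "--prompt" in args else None)
--     if flag is None:
--         return args, None
--     before, after = _split_at(args, flag)
--     words, rest = _take_words(after)
--     return before + rest, (" ".join(words) if words else None)
--
--
-- def _split_at(xs, flag):
--     # first occurrence of flag is guaranteed present
--     if xs[0] == flag:
--         return [], xs[1:]
--     before, after = _split_at(xs[1:], flag)
--     return [xs[0]] + before, after
--
--
-- def _take_words(xs):
--     if not xs or xs[0].startswith('-'):
--         return [], xs
--     words, rest = _take_words(xs[1:])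
--     return [xs[0]] + words, rest
-- ===== Notes on version B (the rewrite author's own statement) =====
-- stated objective: alternative
-- what changed: B is a pure recursive decomposition over the list structure (no indices): it recursively splits the list at the flag and recursively peels prompt words off the tail, instead of A's index-based range loop that appends/extends inside the loop with a break.
import Mathlib
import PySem

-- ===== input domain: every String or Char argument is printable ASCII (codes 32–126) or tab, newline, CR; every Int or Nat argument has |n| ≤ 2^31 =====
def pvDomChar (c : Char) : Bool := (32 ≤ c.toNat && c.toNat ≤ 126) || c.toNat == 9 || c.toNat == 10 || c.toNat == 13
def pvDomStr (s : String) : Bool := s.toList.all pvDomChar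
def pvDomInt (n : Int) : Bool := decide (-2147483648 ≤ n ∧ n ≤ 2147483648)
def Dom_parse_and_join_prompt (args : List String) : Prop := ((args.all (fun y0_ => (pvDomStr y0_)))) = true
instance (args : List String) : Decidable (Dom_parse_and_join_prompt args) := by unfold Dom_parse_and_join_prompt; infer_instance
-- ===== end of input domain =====

-- B re-implements parse_and_join_prompt by pure recursive decomposition over the list
-- (recursively split at the flag, recursively peel prompt words), instead of A's
-- index-based range loop with append/extend/break; objective: alternative (same O(n) cost).


-- ===== PORT A =====
-- A's for-loop with break: appends words to pw, on the first '-'-prefixed arg extends rem with the rest and stops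
def pjpLoopA (args : List String) (i : Nat) (rem pw : List String) : List String × List String :=
  if h : i < args.length then
    let arg := args[i]
    if PySem.Str.startswith arg "-" then (rem ++ args.drop i, pw)
    else pjpLoopA args (i + 1) rem (pw ++ [arg])
  else (rem, pw)
termination_by args.length - i

def parse_and_join_prompt (args : List String) : List String × Option String :=
  let pIdx? : Option Nat :=
    if args.contains "-p" then PySem.List.index? args "-p"
    else if args.contains "--prompt" then PySem.List.index? args "--prompt"
    else none
  match pIdx? with
  | none => (args, none)
  | some p =>
    let remaining_args := args.take p
    let res := pjpLoopA args (p + 1) remaining_args []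
    if res.2 = [] then (res.1, none)
    else (res.1, some (PySem.Str.join " " res.2))

-- ===== PORT B =====
-- _split_at: recursively split the list at the first occurrence of the flag
-- (Python raises IndexError on [] but B only calls it with the flag present; [] base case is unreachable)
def pjpSplitAt : List String → String → List String × List String
  | [], _ => ([], [])
  | x :: xs, flag =>
    if x = flag then ([], xs)
    else
      let r := pjpSplitAt xs flag
      (x :: r.1, r.2)

-- _take_words: recursively peel prompt words until an option-like argument
def pjpTakeWords : List String → List String × List String
  | [] => ([], [])
  | x :: xs =>
    if PySem.Str.startswith x "-" then ([], x :: xs)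
    else
      let r := pjpTakeWords xs
      (x :: r.1, r.2)

def parse_and_join_prompt_alt (args : List String) : List String × Option String :=
  let flag? : Option String :=
    if args.contains "-p" then some "-p"
    else if args.contains "--prompt" then some "--prompt"
    else none
  match flag? with
  | none => (args, none)
  | some flag =>
    let s := pjpSplitAt args flag
    let t := pjpTakeWords s.2
    (s.1 ++ t.2, if t.1 = [] then none else some (PySem.Str.join " " t.1))

-- ===== PRECONDITION & SPEC =====
def Spec_parse_and_join_prompt (args : List String) (out : List String × Option String) : Prop := out = parse_and_join_prompt_alt args
instance (args : List String) (out : List String × Option String) : Decidable (Spec_parse_and_join_prompt args out) := by unfold Spec_parse_and_join_prompt; infer_instance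

-- ===== CLAIM (what is proved, stated in full; the proofs are below) =====
def Claim_equal_parse_and_join_prompt : Prop := ∀ (args : List String), Dom_parse_and_join_prompt args → Spec_parse_and_join_prompt args (parse_and_join_prompt args)

-- ===== LEMMAS AND PROOFS =====

-- A's loop computed in closed form: boundary = first '-'-prefixed index at or after i
lemma pjpLoopA_eq (args : List String) (i : Nat) (rem pw : List String) :
    pjpLoopA args i rem pw =
      (rem ++ args.drop (i + (args.drop i).findIdx (fun a => PySem.Str.startswith a "-")),
       pw ++ (args.take (i + (args.drop i).findIdx (fun a => PySem.Str.startswith a "-"))).drop i) := by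
  by_cases h : i < args.length
  · have hd : args.drop i = args[i] :: args.drop (i + 1) := List.drop_eq_getElem_cons h
    rw [pjpLoopA]
    simp only [h, dif_pos]
    by_cases hs : PySem.Str.startswith args[i] "-" = true
    · have hs' : PySem.Chars.startswith args[i].toList ['-'] = true := by
        simpa [PySem.Str.startswith] using hs
      have hz : (args.drop i).findIdx (fun a => PySem.Str.startswith a "-") = 0 := by
        rw [hd, List.findIdx_cons]; simp [hs']
      rw [if_pos hs, hz]
      simp
    · have hs' : ¬ PySem.Chars.startswith args[i].toList ['-'] = true := by
        simpa [PySem.Str.startswith] using hs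
      have hfi : (args.drop i).findIdx (fun a => PySem.Str.startswith a "-")
          = ((args.drop (i + 1)).findIdx (fun a => PySem.Str.startswith a "-")) + 1 := by
        rw [hd, List.findIdx_cons]; simp [hs']
      have ih := pjpLoopA_eq args (i + 1) rem (pw ++ [args[i]])
      rw [if_neg hs, ih, hfi]
      set k := (args.drop (i + 1)).findIdx (fun a => PySem.Str.startswith a "-") with hk
      have harith : i + (k + 1) = i + 1 + k := by omega
      rw [harith]
      have hlt : i < (args.take (i + 1 + k)).length := by
        simp only [List.length_take]; omega
      have hdt : (args.take (i + 1 + k)).drop i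
          = (args.take (i + 1 + k))[i] :: (args.take (i + 1 + k)).drop (i + 1) :=
        List.drop_eq_getElem_cons hlt
      have hget : (args.take (i + 1 + k))[i]'hlt = args[i] := by
        simp
      rw [hdt, hget]
      simp
  · have hdrop : args.drop i = [] := List.drop_eq_nil_of_le (by omega)
    rw [pjpLoopA]
    simp only [h, dif_neg, not_false_iff]
    have hz : (args.take i).drop i = [] := by
      apply List.drop_eq_nil_of_le; simp
    simp [hdrop, hz]
termination_by args.length - i

-- B's _split_at at the first occurrence
lemma pjpSplitAt_append (pre suf : List String) (flag : String) (h : flag ∉ pre) :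
    pjpSplitAt (pre ++ flag :: suf) flag = (pre, suf) := by
  induction pre with
  | nil => simp [pjpSplitAt]
  | cons x xs ih =>
    have hx : ¬ (x = flag) := by
      intro hxe; exact h (by simp [hxe])
    have hxs : flag ∉ xs := by
      intro hm; exact h (by simp [hm])
    simp [pjpSplitAt, hx, ih hxs]

-- B's _take_words in closed form: split at the first '-'-prefixed element
lemma pjpTakeWords_eq (xs : List String) :
    pjpTakeWords xs =
      (xs.take (xs.findIdx (fun a => PySem.Str.startswith a "-")),
       xs.drop (xs.findIdx (fun a => PySem.Str.startswith a "-"))) := by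
  induction xs with
  | nil => simp [pjpTakeWords]
  | cons x xs ih =>
    by_cases hs : PySem.Str.startswith x "-" = true
    · have hs' : PySem.Chars.startswith x.toList ['-'] = true := by
        simpa [PySem.Str.startswith] using hs
      simp [pjpTakeWords, hs', List.findIdx_cons]
    · have hs' : ¬ PySem.Chars.startswith x.toList ['-'] = true := by
        simpa [PySem.Str.startswith] using hs
      simp [pjpTakeWords, hs', List.findIdx_cons, ih]

-- the two post-flag computations agree whenever the flag occurs at index p
lemma pjp_flag_eq (args : List String) (flag : String) (p : Nat)
    (h : PySem.List.index? args flag = some p) :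
    (if (pjpLoopA args (p + 1) (args.take p) []).2 = []
       then ((pjpLoopA args (p + 1) (args.take p) []).1, (none : Option String))
       else ((pjpLoopA args (p + 1) (args.take p) []).1,
             some (PySem.Str.join " " (pjpLoopA args (p + 1) (args.take p) []).2)))
    = ((pjpSplitAt args flag).1 ++ (pjpTakeWords (pjpSplitAt args flag).2).2,
       if (pjpTakeWords (pjpSplitAt args flag).2).1 = [] then none
       else some (PySem.Str.join " " (pjpTakeWords (pjpSplitAt args flag).2).1)) := by
  obtain ⟨pre, suf, hargs, hlen, hnotin⟩ := (PySem.List.index?_eq_some_iff args flag p).1 h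
  subst hargs hlen
  rw [pjpSplitAt_append pre suf flag hnotin, pjpLoopA_eq, pjpTakeWords_eq]
  have hpre1 : pre.length + 1 = (pre ++ [flag]).length := by simp
  have hassoc : pre ++ flag :: suf = (pre ++ [flag]) ++ suf := by simp
  set k := suf.findIdx (fun a => PySem.Str.startswith a "-") with hk
  have hdropf : (pre ++ flag :: suf).drop (pre.length + 1) = suf := by
    rw [hassoc, hpre1, List.drop_left]
  have hdrop2 : (pre ++ flag :: suf).drop (pre.length + 1 + k) = suf.drop k := by
    rw [hassoc, hpre1, List.drop_append]
    simp
  have htake2 : ((pre ++ flag :: suf).take (pre.length + 1 + k)).drop (pre.length + 1) = suf.take k := by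
    rw [hassoc, hpre1, List.take_append]
    simp
  have htakep : (pre ++ flag :: suf).take pre.length = pre := List.take_left
  rw [hdropf, hdrop2, htake2, htakep]
  simp only [List.nil_append]
  by_cases hw : suf.take k = []
  · simp [hw]
  · simp [hw]

-- ===== VERDICT (by name: the statement is the Claim_ definition above) =====
theorem parse_and_join_prompt_spec : Claim_equal_parse_and_join_prompt := by
  intro args _
  unfold Spec_parse_and_join_prompt parse_and_join_prompt parse_and_join_prompt_alt
  by_cases h1 : args.contains "-p"
  · have hm : "-p" ∈ args := by simpa using h1
    obtain ⟨p, hp⟩ := Option.isSome_iff_exists.1 ((PySem.List.index?_isSome_iff args "-p").2 hm)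
    simp only [h1, if_true, hp]
    exact pjp_flag_eq args "-p" p hp
  · by_cases h2 : args.contains "--prompt"
    · have hm : "--prompt" ∈ args := by simpa using h2
      obtain ⟨p, hp⟩ := Option.isSome_iff_exists.1 ((PySem.List.index?_isSome_iff args "--prompt").2 hm)
      simp only [h1, h2, if_true, hp]
      exact pjp_flag_eq args "--prompt" p hp
    · have hm1 : "-p" ∉ args := by simpa using h1
      have hm2 : "--prompt" ∉ args := by simpa using h2
      simp [hm1, hm2]
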